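-- pv_equiv track=rewrite | github.com/ReniKoci/LeetCode | 2191-sort-the-jumbled-numbers/2191-sort-the-jumbled-numbers.py | get_transformed_number
-- ===== SOURCE A (Python) =====
-- def get_transformed_number(mapping, num):
--     new_num = 0
--     i = 1
--     while True:
--         dec = num % 10
--         num = num // 10
--
--         new_num = new_num + (i * mapping[dec])
--         i *= 10
--
--         if num == 0:
--             break
--
--     return new_num
-- ===== SOURCE B (Python) =====
-- def get_transformed_number(mapping, num):
--     res = 0
--     for c in str(num):
--         res = res * 10 + mapping[int(c)]
--     return res
-- ===== Notes on version B (the rewrite author's own statement) =====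
-- stated objective: idiomatic
-- what changed: B walks the decimal string of num most-significant-digit first with a Horner accumulation (res = res*10 + mapping[digit]) instead of A's while-loop peeling least-significant digits with %/// and accumulating an explicit place-value multiplier.
import Mathlib
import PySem

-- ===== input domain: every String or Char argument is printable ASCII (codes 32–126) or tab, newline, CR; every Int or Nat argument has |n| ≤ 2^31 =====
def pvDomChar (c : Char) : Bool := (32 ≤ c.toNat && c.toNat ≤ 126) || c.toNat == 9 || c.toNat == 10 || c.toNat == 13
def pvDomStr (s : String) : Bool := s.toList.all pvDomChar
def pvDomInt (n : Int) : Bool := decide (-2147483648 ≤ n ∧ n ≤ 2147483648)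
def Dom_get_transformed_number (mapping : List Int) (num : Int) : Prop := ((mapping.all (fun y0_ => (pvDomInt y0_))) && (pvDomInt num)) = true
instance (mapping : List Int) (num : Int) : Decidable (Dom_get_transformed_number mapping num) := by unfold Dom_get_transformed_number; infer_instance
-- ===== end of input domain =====

-- B rebuilds the number Horner-style from the decimal string (most-significant digit first)
-- instead of A's least-significant-first %-// loop with an explicit place-value multiplier;
-- equivalence of the return values is proved on Pre_ (A's terminating, non-raising inputs).

-- ===== PORT A =====
-- the while-True loop; fuel only makes it total (under Pre_ it is never exhausted).
-- mapping[dec] is in range under Pre_, so '.getD 0' never supplies its default there.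
def pvALoop (mapping : List Int) (num new_num i : Int) : Nat → Int
  | 0 => new_num
  | fuel + 1 =>
    let dec := PySem.Int.mod num 10
    let num' := PySem.Int.floordiv num 10
    let new_num' := new_num + (i * ((PySem.List.pyGet? mapping dec).getD 0))
    let i' := i * 10
    if num' = 0 then new_num' else pvALoop mapping num' new_num' i' fuel

def get_transformed_number (mapping : List Int) (num : Int) : Int :=
  pvALoop mapping num 0 1 (num.toNat + 1)

-- ===== PORT B =====
-- for c in str(num): res = res*10 + mapping[int(c)].  int(c) via PySem.Int.ofChars?;
-- under Pre_ every character is a decimal digit, so '.getD 0' never supplies its default.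
def get_transformed_number_alt (mapping : List Int) (num : Int) : Int :=
  (PySem.Int.toChars num).foldl
    (fun res c =>
      res * 10 + (PySem.List.pyGet? mapping ((PySem.Int.ofChars? [c]).getD 0)).getD 0)
    0

-- ===== PRECONDITION & SPEC =====
-- exactly the inputs on which Python A returns: num < 0 makes the while-loop diverge
-- (num never reaches 0 under floor division), and mapping[dec] must be in range for
-- every decimal digit dec of num (mapping ≠ [] covers num = 0, whose digit list is empty).
def Pre_get_transformed_number (mapping : List Int) (num : Int) : Prop :=
  0 ≤ num ∧ mapping ≠ [] ∧ ∀ d ∈ Nat.digits 10 num.toNat, d < mapping.length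
instance (mapping : List Int) (num : Int) : Decidable (Pre_get_transformed_number mapping num) := by unfold Pre_get_transformed_number; infer_instance

def pvWitness_get_transformed_number : List Int × Int := ([8, 9, 4, 0, 1, 7, 5, 3, 2, 6], 338)

def Spec_get_transformed_number (mapping : List Int) (num : Int) (out : Int) : Prop := out = get_transformed_number_alt mapping num
instance (mapping : List Int) (num : Int) (out : Int) : Decidable (Spec_get_transformed_number mapping num out) := by unfold Spec_get_transformed_number; infer_instance

-- ===== CLAIM (what is proved, stated in full; the proofs are below) =====
def Claim_equal_get_transformed_number : Prop := ∀ (mapping : List Int) (num : Int), Dom_get_transformed_number mapping num → Pre_get_transformed_number mapping num → Spec_get_transformed_number mapping num (get_transformed_number mapping num)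

-- ===== LEMMAS AND PROOFS =====

-- common reference value: the mapped place-value sum of the digits of n
def pvRef (mapping : List Int) (n : Nat) : Int :=
  if n < 10 then (PySem.List.pyGet? mapping (n : Int)).getD 0
  else pvRef mapping (n / 10) * 10 + (PySem.List.pyGet? mapping ((n % 10 : Nat) : Int)).getD 0
termination_by n
decreasing_by exact Nat.div_lt_self (by omega) (by omega)

-- A's loop computes new + i * pvRef n
theorem pvALoop_eq (mapping : List Int) (fuel : Nat) :
    ∀ (n : Nat) (new i : Int), n < fuel →
      pvALoop mapping (n : Int) new i fuel = new + i * pvRef mapping n := by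
  induction fuel with
  | zero => intro n new i h; omega
  | succ f ih =>
    intro n new i h
    have hmod : PySem.Int.mod (n : Int) 10 = ((n % 10 : Nat) : Int) := by
      exact_mod_cast PySem.Int.mod_natCast n 10
    have hdiv : PySem.Int.floordiv (n : Int) 10 = ((n / 10 : Nat) : Int) := by
      exact_mod_cast PySem.Int.floordiv_natCast n 10
    simp only [pvALoop, hmod, hdiv]
    by_cases h10 : n < 10
    · have hz : n / 10 = 0 := Nat.div_eq_of_lt h10
      rw [pvRef, if_pos h10]
      simp [hz, Nat.mod_eq_of_lt h10]
    · have hz : n / 10 ≠ 0 := by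
        intro hz; exact h10 (Nat.lt_of_div_eq_zero (by omega) hz)
      rw [if_neg (by exact_mod_cast hz),
        ih (n / 10) _ _ (by
          have : n / 10 < n := Nat.div_lt_self (by omega) (by omega)
          omega)]
      conv_rhs => rw [pvRef, if_neg h10]
      ring

-- decimal digit characters parse back to their value
theorem pvDigitChar_val (d : Nat) (hd : d < 10) :
    (PySem.Int.ofChars? [Nat.digitChar d]).getD 0 = (d : Int) := by
  interval_cases d <;> decide

-- big-endian digit-character list of n (n ≥ 1 has no leading zeros; total for all n)
def pvChars (n : Nat) : List Char :=
  if n < 10 then [Nat.digitChar n]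
  else pvChars (n / 10) ++ [Nat.digitChar (n % 10)]
termination_by n
decreasing_by exact Nat.div_lt_self (by omega) (by omega)

theorem pvToDigitsCore_eq (fuel : Nat) :
    ∀ (n : Nat) (acc : List Char), n < fuel →
      Nat.toDigitsCore 10 fuel n acc = pvChars n ++ acc := by
  induction fuel with
  | zero => intro n acc h; omega
  | succ f ih =>
    intro n acc h
    simp only [Nat.toDigitsCore]
    by_cases h10 : n < 10
    · have hz : n / 10 = 0 := Nat.div_eq_of_lt h10
      rw [pvChars, if_pos h10]
      simp [hz, Nat.mod_eq_of_lt h10]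
    · have hz : n / 10 ≠ 0 := by
        intro hz; exact h10 (Nat.lt_of_div_eq_zero (by omega) hz)
      rw [if_neg hz,
        ih (n / 10) _ (by
          have : n / 10 < n := Nat.div_lt_self (by omega) (by omega)
          omega)]
      conv_rhs => rw [pvChars, if_neg h10]
      simp

theorem pvToDigits_eq (n : Nat) : Nat.toDigits 10 n = pvChars n := by
  have := pvToDigitsCore_eq (n + 1) n [] (by omega)
  simpa [Nat.toDigits] using this

-- B's Horner fold over the digit characters computes pvRef
theorem pvFold_eq (mapping : List Int) (n : Nat) :
    (pvChars n).foldl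
      (fun res c =>
        res * 10 + (PySem.List.pyGet? mapping ((PySem.Int.ofChars? [c]).getD 0)).getD 0)
      0 = pvRef mapping n := by
  induction n using Nat.strong_induction_on with
  | _ n ih =>
    by_cases h10 : n < 10
    · rw [pvChars, if_pos h10, pvRef, if_pos h10]
      simp [pvDigitChar_val n h10]
    · rw [pvChars, if_neg h10, pvRef, if_neg h10]
      rw [List.foldl_append]
      rw [ih (n / 10) (Nat.div_lt_self (by omega) (by omega))]
      simp [pvDigitChar_val (n % 10) (Nat.mod_lt n (by omega))]

-- ===== VERDICT (by name: the statement is the Claim_ definition above) =====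
theorem get_transformed_number_spec : Claim_equal_get_transformed_number := by
  intro mapping num _hdom hpre
  obtain ⟨hnn, -, -⟩ := hpre
  unfold Spec_get_transformed_number get_transformed_number get_transformed_number_alt
  have hcast : ((num.toNat : Nat) : Int) = num := Int.toNat_of_nonneg hnn
  have hA := pvALoop_eq mapping (num.toNat + 1) num.toNat 0 1 (by omega)
  rw [hcast] at hA
  rw [hA]
  have hchars : PySem.Int.toChars num = pvChars num.toNat := by
    unfold PySem.Int.toChars
    rw [if_neg (by omega)]
    exact pvToDigits_eq num.toNat
  rw [hchars, pvFold_eq]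
  ring
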